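-- pv_equiv track=rewrite | github.com/srswart/mserfurt | scribesim/annotate/wordassist.py | _proposal_mode
-- ===== SOURCE A (Python) =====
-- from typing import Any
--
-- def _proposal_mode(segments: list[dict[str, Any]]) -> str:
--     if not segments:
--         return "empty"
--     guide_count = sum(1 for item in segments if bool(item.get("guide_available")))
--     if guide_count == len(segments):
--         return "guide-assisted"
--     if guide_count == 0:
--         return "bootstrap"
--     return "mixed"
-- ===== SOURCE B (Python) =====
-- def _proposal_mode(segments):
--     if not segments:
--         return "empty"
--     it = iter(segments)
--     first = bool(next(it).get("guide_available"))
--     for item in it: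
--         if bool(item.get("guide_available")) != first:
--             return "mixed"
--     return "guide-assisted" if first else "bootstrap"
-- ===== Notes on version B (the rewrite author's own statement) =====
-- stated objective: alternative
-- what changed: B keeps no aggregate at all: it takes the first element's boolean guide state, scans the rest comparing each state to it and returns 'mixed' at the first mismatch (short-circuit); if none mismatches the first state alone decides 'guide-assisted' vs 'bootstrap', whereas A sums a count over the whole list and compares it to len and 0.
import Mathlib
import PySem

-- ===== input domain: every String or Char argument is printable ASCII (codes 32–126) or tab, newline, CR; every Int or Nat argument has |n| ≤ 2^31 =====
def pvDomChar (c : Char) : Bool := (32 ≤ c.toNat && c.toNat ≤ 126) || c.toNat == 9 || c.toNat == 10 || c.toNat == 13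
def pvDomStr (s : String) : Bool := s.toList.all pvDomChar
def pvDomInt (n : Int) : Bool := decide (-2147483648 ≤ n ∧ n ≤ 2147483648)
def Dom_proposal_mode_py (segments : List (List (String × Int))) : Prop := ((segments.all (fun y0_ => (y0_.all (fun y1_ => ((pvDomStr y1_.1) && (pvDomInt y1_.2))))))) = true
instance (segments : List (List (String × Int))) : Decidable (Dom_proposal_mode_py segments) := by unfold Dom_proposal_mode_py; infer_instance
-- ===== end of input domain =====

-- B keeps no aggregate: it compares every later element's guide state to the first element's
-- and short-circuits to "mixed" at the first mismatch; A sums a count over the whole list (alternative; same worst-case cost).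

-- ===== PORT A =====
-- bool(item.get("guide_available")) (Python truthiness of an Int-or-missing value)
def pvTruthy : Option Int → Bool
  | none => false
  | some v => v != 0

def pvGuide (item : List (String × Int)) : Bool :=
  pvTruthy ((PySem.Dict.mk item).get? "guide_available")

def proposal_mode_py (segments : List (List (String × Int))) : String :=
  if segments = [] then "empty"
  else
    let guide_count : Int :=
      (segments.map (fun item => if pvGuide item then (1 : Int) else 0)).sum
    if guide_count = PySem.List.len segments then "guide-assisted"
    else if guide_count = 0 then "bootstrap"
    else "mixed"

-- ===== PORT B =====
-- the for-loop over the remaining iterator, with its early `return "mixed"`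
def pvScanRest (first : Bool) : List (List (String × Int)) → String
  | [] => if first then "guide-assisted" else "bootstrap"
  | item :: rest =>
      if pvGuide item != first then "mixed" else pvScanRest first rest

def proposal_mode_py_alt (segments : List (List (String × Int))) : String :=
  match segments with
  | [] => "empty"
  | h :: t => pvScanRest (pvGuide h) t

-- ===== PRECONDITION & SPEC =====
def Spec_proposal_mode_py (segments : List (List (String × Int))) (out : String) : Prop := out = proposal_mode_py_alt segments
instance (segments : List (List (String × Int))) (out : String) : Decidable (Spec_proposal_mode_py segments out) := by unfold Spec_proposal_mode_py; infer_instance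

-- ===== CLAIM (what is proved, stated in full; the proofs are below) =====
def Claim_equal_proposal_mode_py : Prop := ∀ (segments : List (List (String × Int))), Dom_proposal_mode_py segments → Spec_proposal_mode_py segments (proposal_mode_py segments)

-- ===== LEMMAS AND PROOFS =====

lemma sum_ite_eq_countP (xs : List (List (String × Int))) :
    (xs.map (fun x => if pvGuide x then (1 : Int) else 0)).sum = (xs.countP pvGuide : Int) := by
  induction xs with
  | nil => simp
  | cons a xs ih =>
    by_cases h : pvGuide a <;> simp [h, ih] <;> omega

lemma pvScanRest_eq (first : Bool) (t : List (List (String × Int))) :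
    pvScanRest first t =
      if ∀ x ∈ t, pvGuide x = first then
        (if first then "guide-assisted" else "bootstrap")
      else "mixed" := by
  induction t with
  | nil => simp [pvScanRest]
  | cons a t ih =>
    by_cases h : pvGuide a = first
    · simp [pvScanRest, h, ih]
    · simp [pvScanRest, h]

-- ===== VERDICT (by name: the statement is the Claim_ definition above) =====
theorem proposal_mode_py_spec : Claim_equal_proposal_mode_py := by
  intro segments _
  unfold Spec_proposal_mode_py proposal_mode_py proposal_mode_py_alt
  match segments with
  | [] => simp
  | h :: t =>
    rw [if_neg (by simp : ¬ (h :: t = []))]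
    rw [sum_ite_eq_countP, PySem.List.len_eq]
    show (if ((h :: t).countP pvGuide : Int) = (((h :: t).length : Nat) : Int) then "guide-assisted"
          else if ((h :: t).countP pvGuide : Int) = 0 then "bootstrap" else "mixed")
        = pvScanRest (pvGuide h) t
    rw [pvScanRest_eq]
    have hmem : h ∈ h :: t := by simp
    by_cases hall : ∀ x ∈ t, pvGuide x = pvGuide h
    · by_cases hh : pvGuide h = true
      · have hc : (h :: t).countP pvGuide = (h :: t).length := by
          apply List.countP_eq_length.2
          intro x hx
          rcases List.mem_cons.1 hx with rfl | hx'
          · exact hh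
          · rw [hall x hx']; exact hh
        rw [if_pos (by exact_mod_cast hc), if_pos hall, if_pos hh]
      · have hc : (h :: t).countP pvGuide = 0 := by
          apply List.countP_eq_zero.2
          intro x hx
          rcases List.mem_cons.1 hx with rfl | hx'
          · simp [hh]
          · rw [hall x hx']; simp [hh]
        have hlen : ¬ (((h :: t).countP pvGuide : Int) = ((h :: t).length : Int)) := by
          rw [hc]; push_cast; simp; omega
        rw [if_neg hlen, if_pos (by exact_mod_cast hc), if_pos hall, if_neg hh]
    · have hx0 : ∃ x ∈ t, pvGuide x ≠ pvGuide h := by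
        by_contra hc
        exact hall (fun x hx => by
          by_contra hne
          exact hc ⟨x, hx, hne⟩)
      obtain ⟨x, hx, hne⟩ := hx0
      have h1 : (h :: t).countP pvGuide ≠ (h :: t).length := by
        intro hc
        have hal := List.countP_eq_length.1 hc
        exact hne (by rw [hal x (List.mem_cons_of_mem _ hx), hal h hmem])
      have h2 : (h :: t).countP pvGuide ≠ 0 := by
        intro hc
        have hal := List.countP_eq_zero.1 hc
        have e1 : pvGuide x = false := by
          have := hal x (List.mem_cons_of_mem _ hx); simpa using this
        have e2 : pvGuide h = false := by
          have := hal h hmem; simpa using this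
        exact hne (by rw [e1, e2])
      rw [if_neg (by exact_mod_cast h1), if_neg (by exact_mod_cast h2), if_neg hall]
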